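-- pv_equiv track=rewrite | github.com/pypi-data/pypi-mirror-398 | packages/dotpop/dotpop-1.0.1-py3-none-any.whl/dotpop/conditions.py | _matching_parens
-- ===== SOURCE A (Python) =====
-- def _matching_parens(expr: str) -> bool:
--     if not (expr.startswith('(') and expr.endswith(')')):
--         return False
--
--     depth = 0
--     for i, char in enumerate(expr):
--         if char == '(':
--             depth += 1
--         elif char == ')':
--             depth -= 1
--
--         if depth == 0 and i < len(expr) - 1:
--             return False
--
--     return depth == 0
-- ===== SOURCE B (Python) =====
-- def _matching_parens(expr: str) -> bool:
--     # Build the full partner map of matched parentheses with an index stack,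
--     # then read off whether index 0 is matched with the last index.
--     pairs = {}
--     stack = []
--     for i, char in enumerate(expr):
--         if char == '(':
--             stack.append(i)
--         elif char == ')' and stack:
--             pairs[stack.pop()] = i
--     return pairs.get(0) == len(expr) - 1
-- ===== Notes on version B (the rewrite author's own statement) =====
-- stated objective: alternative
-- what changed: Instead of A's guarded depth-counter scan with early return, B builds the complete matching-pairs map of the string with an index stack (classic parenthesis matching) and answers by a single lookup: the partner of index 0 must be the last index; the startswith/endswith guard disappears because it is implied by that lookup.
import Mathlib
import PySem

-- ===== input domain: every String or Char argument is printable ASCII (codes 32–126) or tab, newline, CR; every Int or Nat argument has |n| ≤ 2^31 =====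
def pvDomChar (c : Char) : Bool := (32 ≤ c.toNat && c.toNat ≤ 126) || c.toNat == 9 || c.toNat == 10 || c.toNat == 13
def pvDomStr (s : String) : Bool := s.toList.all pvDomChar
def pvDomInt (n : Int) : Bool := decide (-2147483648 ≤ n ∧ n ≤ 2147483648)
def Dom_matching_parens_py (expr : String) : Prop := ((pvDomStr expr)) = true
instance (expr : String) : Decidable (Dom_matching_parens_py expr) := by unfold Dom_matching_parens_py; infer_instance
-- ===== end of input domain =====

-- B replaces A's guarded depth-counter scan by classic stack-based pair matching:
-- build the full partner map, then answer by one lookup (partner of index 0 = last index).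

-- ===== PORT A =====
-- A's for-loop over enumerate(expr) with early return, as structural recursion over the chars with index i.
def mpLoopA : List Char → Int → Nat → Nat → Bool
  | [], depth, _, _ => depth == 0
  | c :: rest, depth, i, n =>
    let depth' := if c = '(' then depth + 1 else if c = ')' then depth - 1 else depth
    if depth' == 0 && decide (i < n - 1) then false
    else mpLoopA rest depth' (i + 1) n

def matching_parens_py (expr : String) : Bool :=
  if !(PySem.Str.startswith expr "(" && PySem.Str.endswith expr ")") then false
  else
    mpLoopA expr.toList 0 0 expr.toList.length

-- ===== PORT B =====
-- loop body: '(' pushes its index; ')' with a nonempty stack pops and records the pair.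
def mpStep (st : PySem.Dict Int Int × List Int) (p : Int × Char) : PySem.Dict Int Int × List Int :=
  if p.2 = '(' then (st.1, st.2 ++ [p.1])
  else if p.2 = ')' then
    match st.2.getLast? with          -- 'and stack: stack.pop()'
    | some j => (st.1.insert j p.1, st.2.dropLast)
    | none => st
  else st

def matching_parens_py_alt (expr : String) : Bool :=
  let st := (PySem.List.enumerate expr.toList 0).foldl mpStep (PySem.Dict.empty, [])
  st.1.get? 0 == some (PySem.Str.len expr - 1)   -- pairs.get(0) == len(expr) - 1 (None compares unequal)

-- ===== PRECONDITION & SPEC =====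
def Spec_matching_parens_py (expr : String) (out : Bool) : Prop := out = matching_parens_py_alt expr
instance (expr : String) (out : Bool) : Decidable (Spec_matching_parens_py expr out) := by unfold Spec_matching_parens_py; infer_instance

-- ===== CLAIM (what is proved, stated in full; the proofs are below) =====
def Claim_equal_matching_parens_py : Prop := ∀ (expr : String), Dom_matching_parens_py expr → Spec_matching_parens_py expr (matching_parens_py expr)

-- ===== LEMMAS AND PROOFS =====

-- While index 0 is out of play (stack elements all ≥ 1, only indices ≥ 1 to come),
-- the fold never touches key 0 of the pairs map.
lemma mpFold_get0_frozen : ∀ (cs : List Char) (i : Nat) (P : PySem.Dict Int Int) (S : List Int),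
    (∀ x ∈ S, 1 ≤ x) → 1 ≤ i →
    (((PySem.List.enumerate cs (i : Int)).foldl mpStep (P, S)).1.get? 0 : Option Int) = P.get? 0 := by
  intro cs
  induction cs with
  | nil => intro i P S _ _; simp [PySem.List.enumerate_nil]
  | cons c rest ih =>
    intro i P S hS hi
    rw [PySem.List.enumerate_cons]
    have hcast : ((i : Int) + 1) = ((i + 1 : Nat) : Int) := by push_cast; ring
    by_cases h1 : c = '('
    · have hstep : mpStep (P, S) ((i : Int), c) = (P, S ++ [(i : Int)]) := by
        simp [mpStep, h1]
      rw [List.foldl_cons, hstep, hcast, ih (i+1) P (S ++ [(i : Int)]) ?_ (by omega)]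
      intro x hx
      rcases List.mem_append.mp hx with h | h
      · exact hS x h
      · simp at h; omega
    · by_cases h2 : c = ')'
      · rcases hL : S.getLast? with _ | j
        · have hstep : mpStep (P, S) ((i : Int), c) = (P, S) := by
            simp [mpStep, h2, hL]
          rw [List.foldl_cons, hstep, hcast, ih (i+1) P S hS (by omega)]
        · have hj : 1 ≤ j := hS j (List.mem_of_getLast? hL)
          have hstep : mpStep (P, S) ((i : Int), c) = (P.insert j (i : Int), S.dropLast) := by
            simp [mpStep, h2, hL]
          rw [List.foldl_cons, hstep, hcast, ih (i+1) _ S.dropLast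
              (fun x hx => hS x (List.dropLast_subset _ hx)) (by omega)]
          exact PySem.Dict.get?_insert_of_ne _ _ (by omega)
      · have hstep : mpStep (P, S) ((i : Int), c) = (P, S) := by
          simp [mpStep, h1, h2]
        rw [List.foldl_cons, hstep, hcast, ih (i+1) P S hS (by omega)]

-- Main invariant: while A's loop is still running (depth = stack size, index 0 at the
-- bottom of the stack, key 0 unset, only higher indices ahead), A's remaining loop and
-- B's remaining fold agree.
lemma mpMain : ∀ (cs : List Char) (i n : Nat) (P : PySem.Dict Int Int) (S : List Int) (s' : List Int),
    i + cs.length = n → 1 ≤ i → S = 0 :: s' → (∀ x ∈ s', 1 ≤ x) → P.get? 0 = none →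
    mpLoopA cs (S.length : Int) i n =
      ((((PySem.List.enumerate cs (i : Int)).foldl mpStep (P, S)).1.get? 0 : Option Int)
        == some ((n : Int) - 1)) := by
  intro cs
  induction cs with
  | nil =>
    intro i n P S s' hn hi hS hs' hP
    simp [PySem.List.enumerate_nil, mpLoopA, hP, hS]
    omega
  | cons c rest ih =>
    intro i n P S s' hn hi hS hs' hP
    rw [PySem.List.enumerate_cons]
    have hcast : ((i : Int) + 1) = ((i + 1 : Nat) : Int) := by push_cast; ring
    have hSlen : 1 ≤ S.length := by rw [hS]; simp
    by_cases h1 : c = '('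
    · -- push
      have hA : mpLoopA (c :: rest) (S.length : Int) i n
          = mpLoopA rest ((S.length : Int) + 1) (i + 1) n := by
        have : ¬ ((S.length : Int) + 1 = 0) := by omega
        simp [mpLoopA, h1, this]
      have hstep : mpStep (P, S) ((i : Int), c) = (P, S ++ [(i : Int)]) := by
        simp [mpStep, h1]
      have hlen : ((S.length : Int) + 1) = (((S ++ [(i : Int)]).length : Nat) : Int) := by
        simp
      rw [hA, List.foldl_cons, hstep, hcast, hlen,
        ih (i+1) n P (S ++ [(i : Int)]) (s' ++ [(i : Int)]) (by simp only [List.length_cons] at hn; omega)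
          (by omega) (by rw [hS]; rfl)
          (by intro x hx; rcases List.mem_append.mp hx with h | h
              · exact hs' x h
              · simp at h; omega) hP]
    · by_cases h2 : c = ')'
      · -- pop
        rcases s' with _ | ⟨y, s''⟩
        · -- S = [0]: the opening paren at index 0 gets closed at index i
          have hL : S.getLast? = some 0 := by rw [hS]; rfl
          have hstep : mpStep (P, S) ((i : Int), c) = (P.insert 0 (i : Int), []) := by
            rw [hS]; simp [mpStep, h2]
          rw [List.foldl_cons, hstep, hcast]
          rcases rest with _ | ⟨r, rs⟩
          · -- i is the last index: both sides are true (i = n - 1)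
            have hi_eq : i + 1 = n := by simpa using hn
            have hA : mpLoopA [c] (S.length : Int) i n = true := by
              have hnd : ¬ (i < n - 1) := by omega
              rw [hS]; simp [mpLoopA, h2, hnd]
            rw [hA, PySem.List.enumerate_nil]
            simp [PySem.Dict.get?_insert_self]
            omega
          · -- i is interior: A returns False; B records partner i ≠ n - 1
            have hlt : i < n - 1 := by simp at hn; omega
            have hA : mpLoopA (c :: r :: rs) (S.length : Int) i n = false := by
              rw [hS]; simp [mpLoopA, h2, hlt]
            rw [hA, mpFold_get0_frozen (r :: rs) (i+1) _ [] (by simp) (by omega),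
              PySem.Dict.get?_insert_self]
            have : ¬ ((i : Int) = (n : Int) - 1) := by omega
            simp [this]
        · -- stack deeper than 1: pop some index j ≥ 1
          obtain ⟨j, hL⟩ := Option.isSome_iff_exists.mp
            (List.getLast?_isSome.mpr (show S ≠ [] by rw [hS]; simp))
          have hj : 1 ≤ j := by
            rw [hS, List.getLast?_cons_cons] at hL
            exact hs' j (List.mem_of_getLast? hL)
          have hlen : S.length = s''.length + 2 := by rw [hS]; simp
          have hA : mpLoopA (c :: rest) (S.length : Int) i n
              = mpLoopA rest ((S.length : Int) - 1) (i + 1) n := by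
            have : ¬ ((S.length : Int) - 1 = 0) := by omega
            simp [mpLoopA, h2, this]
          have hstep : mpStep (P, S) ((i : Int), c) = (P.insert j (i : Int), S.dropLast) := by
            simp [mpStep, h2, hL]
          have hdrop : S.dropLast = 0 :: (y :: s'').dropLast := by
            rw [hS]; exact List.dropLast_cons_of_ne_nil (by simp)
          have hlen2 : ((S.length : Int) - 1) = ((S.dropLast.length : Nat) : Int) := by
            rw [hdrop, hlen]; push_cast; simp; omega
          rw [hA, List.foldl_cons, hstep, hcast, hlen2,
            ih (i+1) n (P.insert j (i : Int)) S.dropLast ((y :: s'').dropLast) (by simp only [List.length_cons] at hn; omega) (by omega)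
              hdrop
              (fun x hx => hs' x (List.dropLast_subset _ hx))
              (by rw [PySem.Dict.get?_insert_of_ne _ _ (by omega)]; exact hP)]
      · -- other char: no state change
        have hA : mpLoopA (c :: rest) (S.length : Int) i n
            = mpLoopA rest (S.length : Int) (i + 1) n := by
          have hne : ¬ S = [] := by rw [hS]; simp
          simp [mpLoopA, h1, h2, hne]
        have hstep : mpStep (P, S) ((i : Int), c) = (P, S) := by
          simp [mpStep, h1, h2]
        rw [hA, List.foldl_cons, hstep, hcast,
          ih (i+1) n P S s' (by simp only [List.length_cons] at hn; omega) (by omega) hS hs' hP]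

-- If A's scan succeeds from a positive depth, the last character must be ')'.
lemma mpLoopA_true_last : ∀ (cs : List Char) (d : Int) (i n : Nat),
    i + cs.length = n → 1 ≤ d → mpLoopA cs d i n = true → cs.getLast? = some ')' := by
  intro cs
  induction cs with
  | nil => intro d i n _ hd h; simp [mpLoopA] at h; omega
  | cons c rest ih =>
    intro d i n hn hd h
    by_cases h1 : c = '('
    · have hA : mpLoopA (c :: rest) d i n = mpLoopA rest (d + 1) (i + 1) n := by
        have : ¬ (d + 1 = 0) := by omega
        simp [mpLoopA, h1, this]
      rw [hA] at h
      rcases rest with _ | ⟨r, rs⟩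
      · simp [mpLoopA] at h; omega
      · rw [List.getLast?_cons_cons]
        exact ih (d + 1) (i + 1) n (by simp only [List.length_cons] at hn ⊢; omega) (by omega) h
    · by_cases h2 : c = ')'
      · rcases rest with _ | ⟨r, rs⟩
        · simp [h2]
        · rw [List.getLast?_cons_cons]
          have hlt : i < n - 1 := by simp only [List.length_cons] at hn; omega
          have hd2 : 2 ≤ d := by
            by_contra hcon
            have hd1 : d = 1 := by omega
            have : mpLoopA (c :: r :: rs) d i n = false := by
              simp [mpLoopA, h2, hd1, hlt]
            rw [this] at h
            exact absurd h (by simp)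
          have hA : mpLoopA (c :: r :: rs) d i n = mpLoopA (r :: rs) (d - 1) (i + 1) n := by
            have : ¬ (d - 1 = 0) := by omega
            simp [mpLoopA, h2, this]
          rw [hA] at h
          exact ih (d - 1) (i + 1) n (by simp only [List.length_cons] at hn ⊢; omega) (by omega) h
      · have hA : mpLoopA (c :: rest) d i n = mpLoopA rest d (i + 1) n := by
          have : ¬ (d = 0) := by omega
          simp [mpLoopA, h1, h2, this]
        rw [hA] at h
        rcases rest with _ | ⟨r, rs⟩
        · simp [mpLoopA] at h; omega
        · rw [List.getLast?_cons_cons]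
          exact ih d (i + 1) n (by simp only [List.length_cons] at hn ⊢; omega) (by omega) h

lemma mpEnds (l : List Char) (h : l.getLast? = some ')') :
    PySem.Chars.endswith l ")".toList = true := by
  rw [PySem.Chars.endswith_iff]
  obtain ⟨l', hl'⟩ := List.getLast?_eq_some_iff.mp h
  exact ⟨l', by simpa using hl'.symm⟩

-- the whole goal, restated over the character list
lemma mpTop (l : List Char) :
    (if !(PySem.Chars.startswith l "(".toList && PySem.Chars.endswith l ")".toList) then false
      else mpLoopA l 0 0 l.length)
    = (((PySem.List.enumerate l 0).foldl mpStep (PySem.Dict.empty, [])).1.get? 0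
        == some ((l.length : Int) - 1)) := by
  rcases l with _ | ⟨c, rest⟩
  · simp [PySem.Chars.startswith, PySem.Chars.endswith, PySem.List.enumerate_nil]
  · by_cases h1 : c = '('
    · subst h1
      have hstart : PySem.Chars.startswith ('(' :: rest) "(".toList = true := by
        rw [PySem.Chars.startswith_iff]
        exact ⟨rest, by simp⟩
      have hB : (((PySem.List.enumerate ('(' :: rest) (0 : Int)).foldl mpStep
            (PySem.Dict.empty, ([] : List Int))).1.get? 0
            == some (((('(' :: rest).length : Nat) : Int) - 1))
          = mpLoopA rest 1 1 ('(' :: rest).length := by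
        rw [PySem.List.enumerate_cons, List.foldl_cons]
        have hstep : mpStep (PySem.Dict.empty, ([] : List Int)) ((0 : Int), '(')
            = (PySem.Dict.empty, [(0 : Int)]) := by simp [mpStep]
        rw [hstep, show ((0 : Int) + 1) = ((1 : Nat) : Int) by norm_num]
        have hm := mpMain rest 1 (('(' :: rest).length) PySem.Dict.empty [0] []
          (by simp; omega) (by omega) rfl (by simp) (by simp)
        simpa using hm.symm
      have hA1 : mpLoopA ('(' :: rest) 0 0 ('(' :: rest).length
          = mpLoopA rest 1 1 ('(' :: rest).length := by
        simp [mpLoopA]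
      rw [hstart]
      cases hg : PySem.Chars.endswith ('(' :: rest) ")".toList with
      | true =>
        simp only [Bool.and_self, Bool.not_true]
        rw [if_neg (by simp), hA1, ← hB]
      | false =>
        simp only [Bool.and_false, Bool.not_false, if_true]
        rw [hB]
        cases hr : mpLoopA rest 1 1 ('(' :: rest).length with
        | false => rfl
        | true =>
          exfalso
          rcases rest with _ | ⟨r, rs⟩
          · simp [mpLoopA] at hr
          · have hlast := mpLoopA_true_last (r :: rs) 1 1 (('(' :: r :: rs).length)
              (by simp; omega) (by omega) hr
            have : PySem.Chars.endswith ('(' :: r :: rs) ")".toList = true := by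
              apply mpEnds
              rw [List.getLast?_cons_cons]
              exact hlast
            rw [this] at hg
            exact absurd hg (by simp)
    · -- first char is not '(': guard false, and key 0 is never written
      have hstart : PySem.Chars.startswith (c :: rest) "(".toList = false := by
        cases hq : PySem.Chars.startswith (c :: rest) "(".toList with
        | false => rfl
        | true =>
          rw [PySem.Chars.startswith_iff] at hq
          obtain ⟨t, ht⟩ := hq
          simp at ht
          exact absurd ht.1.symm h1
      rw [hstart]
      simp only [Bool.false_and, Bool.not_false, if_true]
      rw [PySem.List.enumerate_cons, List.foldl_cons]
      have hstep : mpStep (PySem.Dict.empty, ([] : List Int)) ((0 : Int), c)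
          = (PySem.Dict.empty, ([] : List Int)) := by
        by_cases h2 : c = ')' <;> simp [mpStep, h1, h2]
      rw [hstep, show ((0 : Int) + 1) = ((1 : Nat) : Int) by norm_num,
        mpFold_get0_frozen rest 1 PySem.Dict.empty [] (by simp) (by omega)]
      simp

-- ===== VERDICT (by name: the statement is the Claim_ definition above) =====
theorem matching_parens_py_spec : Claim_equal_matching_parens_py := by
  intro expr _
  unfold Spec_matching_parens_py matching_parens_py matching_parens_py_alt
  simp only [PySem.Str.startswith_eq, PySem.Str.endswith_eq, PySem.Str.len_eq]
  exact mpTop expr.toList
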